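-- pv_equiv track=rewrite | github.com/codeforamerica/vaxfax | phaxio/utils.py | build_string_from_dict
-- ===== SOURCE A (Python) =====
-- def get_key_from_tuple_list(key: str, string_map: list=[]) -> tuple:
--     return_tuple = next(
--         (
--             (value[1], index)
--             for index, value
--             in enumerate(string_map)
--             if value[0]==key
--         ),
--         None
--     )
--     if return_tuple is None:
--         return_tuple = (key, -1)
--     return return_tuple
--
-- def build_string_from_dict(input_data: dict, string_map: list=[]) -> str:
--     ordered_list   = []
--     unordered_list = []
--     for key, value in input_data.items():
--         key_tuple = get_key_from_tuple_list(key, string_map) + (value,)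
--         if key_tuple[1] is not -1:
--             ordered_list.append(key_tuple)
--         else:
--             unordered_list.append(key_tuple)
--     ordered_list = sorted(ordered_list, key=lambda x: x[1])
--     final_list = ordered_list + unordered_list[::-1]
--     final_string_list = ["{0}: {1}".format(item[0], item[2])
--                          for item in final_list]
--     final_string = "\n".join(final_string_list)
--     return final_string
-- ===== SOURCE B (Python) =====
-- def build_string_from_dict(input_data: dict, string_map: list=[]) -> str:
--     lines = []
--     seen = set()
--     for mapkey, label in string_map:
--         if mapkey in input_data and mapkey not in seen:
--             lines.append("{0}: {1}".format(label, input_data[mapkey]))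
--             seen.add(mapkey)
--     map_keys = {mapkey for mapkey, _ in string_map}
--     leftovers = ["{0}: {1}".format(key, value)
--                  for key, value in input_data.items()
--                  if key not in map_keys]
--     lines.extend(reversed(leftovers))
--     return "\n".join(lines)
-- ===== Notes on version B (the rewrite author's own statement) =====
-- stated objective: faster
-- what changed: Instead of scanning string_map for every dict key and then sorting the found entries by index, B makes one pass over string_map with a seen-set (emitting first occurrences in natural order, so no sort is needed) plus one pass over input_data for the keys absent from string_map.
import Mathlib
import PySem

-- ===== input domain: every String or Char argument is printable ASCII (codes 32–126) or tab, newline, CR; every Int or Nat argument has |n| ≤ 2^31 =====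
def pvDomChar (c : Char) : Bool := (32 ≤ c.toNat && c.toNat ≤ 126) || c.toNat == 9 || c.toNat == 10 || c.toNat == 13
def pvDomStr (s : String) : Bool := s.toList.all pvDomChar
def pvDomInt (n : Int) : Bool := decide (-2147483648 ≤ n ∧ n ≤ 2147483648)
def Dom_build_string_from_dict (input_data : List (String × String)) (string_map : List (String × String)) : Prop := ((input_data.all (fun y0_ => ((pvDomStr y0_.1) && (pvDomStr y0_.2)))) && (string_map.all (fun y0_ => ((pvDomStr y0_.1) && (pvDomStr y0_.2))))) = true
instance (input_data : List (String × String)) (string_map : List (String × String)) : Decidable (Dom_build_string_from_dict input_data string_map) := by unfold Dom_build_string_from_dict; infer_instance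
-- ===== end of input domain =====

-- B replaces A's per-key scan of string_map plus sort with a single seen-set pass over
-- string_map and one pass over input_data (objective: faster, measured).

-- ===== PORT A =====
-- next(((value[1], index) for index, value in enumerate(string_map) if value[0]==key), None),
-- with the None fallback replaced by (key, -1)
def get_key_from_tuple_list (key : String) (string_map : List (String × String)) : String × Int :=
  match (PySem.List.enumerate string_map).find? (fun iv => iv.2.1 == key) with
  | some iv => (iv.2.2, iv.1)
  | none => (key, -1)

-- loop body of A: key_tuple = get_key_from_tuple_list(key, string_map) + (value,);
-- `key_tuple[1] is not -1` behaves as `!= -1` (CPython caches the small int -1)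
def bsfdStep (string_map : List (String × String))
    (acc : List (String × Int × String) × List (String × Int × String))
    (kv : String × String) : List (String × Int × String) × List (String × Int × String) :=
  let g := get_key_from_tuple_list kv.1 string_map
  let key_tuple : String × Int × String := (g.1, g.2, kv.2)
  if key_tuple.2.1 ≠ -1 then (acc.1 ++ [key_tuple], acc.2) else (acc.1, acc.2 ++ [key_tuple])

def build_string_from_dict (input_data : List (String × String)) (string_map : List (String × String)) : String :=
  let p := input_data.foldl (bsfdStep string_map) ([], [])
  let ordered_list := PySem.List.sorted p.1 (fun x => x.2.1)
  let final_list := ordered_list ++ ((PySem.List.slice? p.2 none none (-1)).getD [])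
  let final_string_list := final_list.map (fun item => item.1 ++ ": " ++ item.2.2)
  PySem.Str.join "\n" final_string_list

-- ===== PORT B =====
-- for mapkey, label in string_map: if mapkey in input_data and mapkey not in seen: emit; seen.add(mapkey)
-- (input_data[mapkey] is ported as getD; its default is never used: the guard ensures the key is present)
def bAltLoop (input_data : List (String × String)) :
    List (String × String) → PySem.Set String → List String
  | [], _ => []
  | (mapkey, label) :: rest, seen =>
    if (PySem.Dict.mk input_data).contains mapkey && !(PySem.Set.contains seen mapkey) then
      (label ++ ": " ++ (PySem.Dict.mk input_data).getD mapkey "") ::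
        bAltLoop input_data rest (PySem.Set.add seen mapkey)
    else bAltLoop input_data rest seen

def build_string_from_dict_alt (input_data : List (String × String)) (string_map : List (String × String)) : String :=
  let lines := bAltLoop input_data string_map PySem.Set.empty
  let map_keys : PySem.Set String := PySem.Set.ofList (string_map.map Prod.fst)
  let leftovers := (input_data.filter (fun kv => !(PySem.Set.contains map_keys kv.1))).map
      (fun kv => kv.1 ++ ": " ++ kv.2)
  PySem.Str.join "\n" (lines ++ leftovers.reverse)

-- ===== PRECONDITION & SPEC =====
-- input_data is a Python dict: an association list with duplicate keys does not represent one,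
-- so Pre_ requires the keys to be distinct (it excludes no input the Python A accepts).
def Pre_build_string_from_dict (input_data : List (String × String)) (string_map : List (String × String)) : Prop :=
  (input_data.map Prod.fst).Nodup

instance (input_data : List (String × String)) (string_map : List (String × String)) : Decidable (Pre_build_string_from_dict input_data string_map) := by unfold Pre_build_string_from_dict; infer_instance

def pvWitness_build_string_from_dict : (List (String × String)) × (List (String × String)) :=
  ([("a", "1"), ("b", "2"), ("q", "3")], [("b", "Bee"), ("z", "Zed"), ("a", "Ay")])

def Spec_build_string_from_dict (input_data : List (String × String)) (string_map : List (String × String)) (out : String) : Prop := out = build_string_from_dict_alt input_data string_map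
instance (input_data : List (String × String)) (string_map : List (String × String)) (out : String) : Decidable (Spec_build_string_from_dict input_data string_map out) := by unfold Spec_build_string_from_dict; infer_instance

-- ===== CLAIM (what is proved, stated in full; the proofs are below) =====
def Claim_equal_build_string_from_dict : Prop := ∀ (input_data : List (String × String)) (string_map : List (String × String)), Dom_build_string_from_dict input_data string_map → Pre_build_string_from_dict input_data string_map → Spec_build_string_from_dict input_data string_map (build_string_from_dict input_data string_map)

-- ===== LEMMAS AND PROOFS =====

-- proof-side mirror of bAltLoop that also records the running index and keeps the tuples
def selP (d : List (String × String)) :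
    List (String × String) → Int → PySem.Set String → List (String × Int × String)
  | [], _, _ => []
  | (mk, l) :: rest, i, seen =>
    if (PySem.Dict.mk d).contains mk && !(PySem.Set.contains seen mk) then
      (l, i, (PySem.Dict.mk d).getD mk "") :: selP d rest (i + 1) (PySem.Set.add seen mk)
    else selP d rest (i + 1) seen

-- A's tuple for one dict item
def aTup (sm : List (String × String)) (kv : String × String) : String × Int × String :=
  let g := get_key_from_tuple_list kv.1 sm
  (g.1, g.2, kv.2)

def aOrd (d sm : List (String × String)) : List (String × Int × String) :=
  (d.filter (fun kv => decide ((aTup sm kv).2.1 ≠ -1))).map (aTup sm)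

def aUn (d sm : List (String × String)) : List (String × Int × String) :=
  (d.filter (fun kv => decide ((aTup sm kv).2.1 = -1))).map (aTup sm)

lemma foldl_bsfdStep (sm : List (String × String)) :
    ∀ (l : List (String × String)) (o u : List (String × Int × String)),
      l.foldl (bsfdStep sm) (o, u) = (o ++ aOrd l sm, u ++ aUn l sm) := by
  intro l
  induction l with
  | nil => intro o u; simp [aOrd, aUn]
  | cons kv rest ih =>
    intro o u
    by_cases h : (get_key_from_tuple_list kv.1 sm).2 = -1
    · simp [List.foldl_cons, bsfdStep, aOrd, aUn, aTup, h, ih]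
    · simp [List.foldl_cons, bsfdStep, aOrd, aUn, aTup, h, ih]

lemma bAltLoop_eq_selP (d : List (String × String)) :
    ∀ (sm : List (String × String)) (i : Int) (seen : PySem.Set String),
      bAltLoop d sm seen = (selP d sm i seen).map (fun t => t.1 ++ ": " ++ t.2.2) := by
  intro sm
  induction sm with
  | nil => intro i seen; simp [bAltLoop, selP]
  | cons p rest ih =>
    intro i seen
    obtain ⟨mk, l⟩ := p
    simp only [bAltLoop, selP]
    by_cases h : ((PySem.Dict.mk d).contains mk && !(PySem.Set.contains seen mk)) = true
    · rw [if_pos h, if_pos h, List.map_cons, ← ih (i + 1) (PySem.Set.add seen mk)]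
    · rw [if_neg h, if_neg h, ← ih (i + 1) seen]

lemma selP_lb (d : List (String × String)) :
    ∀ (sm : List (String × String)) (i : Int) (seen : PySem.Set String),
      ∀ t ∈ selP d sm i seen, i ≤ t.2.1 := by
  intro sm
  induction sm with
  | nil => intro i seen t ht; simp [selP] at ht
  | cons p rest ih =>
    intro i seen t ht
    obtain ⟨mk, l⟩ := p
    simp only [selP] at ht
    by_cases h : ((PySem.Dict.mk d).contains mk && !(PySem.Set.contains seen mk)) = true
    · rw [if_pos h] at ht
      rcases List.mem_cons.mp ht with rfl | ht'
      · simp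
      · have := ih (i + 1) (PySem.Set.add seen mk) t ht'; omega
    · rw [if_neg h] at ht
      have := ih (i + 1) seen t ht; omega

lemma selP_pairwise (d : List (String × String)) :
    ∀ (sm : List (String × String)) (i : Int) (seen : PySem.Set String),
      (selP d sm i seen).Pairwise (fun a b => a.2.1 < b.2.1) := by
  intro sm
  induction sm with
  | nil => intro i seen; simp [selP]
  | cons p rest ih =>
    intro i seen
    obtain ⟨mk, l⟩ := p
    simp only [selP]
    by_cases h : ((PySem.Dict.mk d).contains mk && !(PySem.Set.contains seen mk)) = true
    · rw [if_pos h]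
      refine List.Pairwise.cons ?_ (ih (i + 1) (PySem.Set.add seen mk))
      intro t ht
      have := selP_lb d rest (i + 1) (PySem.Set.add seen mk) t ht
      simp; omega
    · rw [if_neg h]
      exact ih (i + 1) seen

lemma mem_selP (d : List (String × String)) :
    ∀ (sm : List (String × String)) (i : Int) (seen : PySem.Set String) (t : String × Int × String),
      t ∈ selP d sm i seen ↔
        ∃ (j : Nat) (h : j < sm.length),
          (PySem.Dict.mk d).contains (sm[j].1) = true ∧ (sm[j].1 ∉ seen) ∧
          (∀ (j' : Nat) (h' : j' < j), (sm[j']'(Nat.lt_trans h' h)).1 ≠ sm[j].1) ∧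
          t = (sm[j].2, i + (j : Int), (PySem.Dict.mk d).getD (sm[j].1) "") := by
  intro sm
  induction sm with
  | nil => intro i seen t; simp [selP]
  | cons p rest ih =>
    intro i seen t
    obtain ⟨mk, l⟩ := p
    simp only [selP]
    by_cases hc : ((PySem.Dict.mk d).contains mk && !(PySem.Set.contains seen mk)) = true
    · rw [if_pos hc]
      obtain ⟨hcd, hcs⟩ := Bool.and_eq_true_iff.mp hc
      have hnotseen : mk ∉ seen := by
        intro hm
        rw [(PySem.Set.contains_iff seen mk).mpr hm] at hcs
        simp at hcs
      rw [List.mem_cons, ih (i + 1) (PySem.Set.add seen mk) t]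
      constructor
      · rintro (rfl | ⟨j, hj, h1, h2, h3, rfl⟩)
        · exact ⟨0, by simp, by simpa using hcd, by simpa using hnotseen, by omega,
            by simp⟩
        · refine ⟨j + 1, by simpa using Nat.succ_lt_succ hj, by simpa using h1, ?_, ?_, ?_⟩
          · simp only [List.getElem_cons_succ]
            intro hm
            exact h2 ((PySem.Set.mem_add seen mk (rest[j].1)).mpr (Or.inl hm))
          · intro j' hj'
            match j' with
            | 0 =>
              simp only [List.getElem_cons_zero, List.getElem_cons_succ]
              intro hq
              exact h2 ((PySem.Set.mem_add seen mk (rest[j].1)).mpr (Or.inr hq.symm))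
            | j'' + 1 =>
              simpa using h3 j'' (by omega)
          · simp only [List.getElem_cons_succ]
            congr 1
            push_cast; ring_nf
      · rintro ⟨j, hj, h1, h2, h3, rfl⟩
        match j with
        | 0 =>
          left
          simp
        | j + 1 =>
          right
          have hjr : j < rest.length := by simpa using Nat.lt_of_succ_lt_succ hj
          refine ⟨j, hjr, by simpa using h1, ?_, ?_, ?_⟩
          · intro hm
            rcases (PySem.Set.mem_add seen mk (rest[j].1)).mp hm with hm' | hm'
            · exact h2 (by simpa using hm')
            · exact (h3 0 (by omega)) (by simpa using hm'.symm)
          · intro j' hj'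
            simpa using h3 (j' + 1) (by omega)
          · simp only [List.getElem_cons_succ]
            congr 1
            push_cast; ring_nf
    · rw [if_neg hc]
      rw [ih (i + 1) seen t]
      have hcfalse : ((PySem.Dict.mk d).contains mk = false) ∨ mk ∈ seen := by
        rcases Bool.and_eq_false_iff.mp (Bool.not_eq_true _ ▸ hc) with h | h
        · exact Or.inl h
        · right
          have : PySem.Set.contains seen mk = true := by
            cases hb : PySem.Set.contains seen mk
            · rw [hb] at h; simp at h
            · rfl
          exact (PySem.Set.contains_iff seen mk).mp this
      constructor
      · rintro ⟨j, hj, h1, h2, h3, rfl⟩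
        have hne : rest[j].1 ≠ mk := by
          intro he
          rcases hcfalse with hf | hf
          · rw [he] at h1; rw [h1] at hf; simp at hf
          · exact h2 (he ▸ hf)
        refine ⟨j + 1, by simpa using Nat.succ_lt_succ hj, by simpa using h1,
          by simpa using h2, ?_, ?_⟩
        · intro j' hj'
          match j' with
          | 0 =>
            simp only [List.getElem_cons_zero, List.getElem_cons_succ]
            exact fun q => hne q.symm
          | j'' + 1 => simpa using h3 j'' (by omega)
        · simp only [List.getElem_cons_succ]
          congr 1
          push_cast; ring_nf
      · rintro ⟨j, hj, h1, h2, h3, rfl⟩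
        match j with
        | 0 =>
          exfalso
          rcases hcfalse with hf | hf
          · simp only [List.getElem_cons_zero] at h1; rw [h1] at hf; simp at hf
          · exact h2 (by simpa using hf)
        | j + 1 =>
          refine ⟨j, by simpa using Nat.lt_of_succ_lt_succ hj, by simpa using h1,
            by simpa using h2, ?_, ?_⟩
          · intro j' hj'
            simpa using h3 (j' + 1) (by omega)
          · simp only [List.getElem_cons_succ]
            congr 1
            push_cast; ring_nf

lemma find_enum_none (sm : List (String × String)) (k : String) :
    ∀ (s : Int),
      ((PySem.List.enumerate sm s).find? (fun iv => iv.2.1 == k)) = none ↔ k ∉ sm.map Prod.fst := by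
  induction sm with
  | nil => intro s; simp [PySem.List.enumerate]
  | cons p rest ih =>
    intro s
    obtain ⟨mk, l⟩ := p
    rw [PySem.List.enumerate_cons]
    by_cases h : mk = k
    · subst h
      simp only [List.find?_cons, BEq.rfl]
      simp
    · have hne : ((mk, l).1 == k) = false := by simp [h]
      simp only [List.find?_cons, hne]
      rw [ih (s + 1)]
      simp [eq_comm]
      tauto

lemma find_enum_some (sm : List (String × String)) (k : String) :
    ∀ (s : Int) (r : Int × (String × String)),
      ((PySem.List.enumerate sm s).find? (fun iv => iv.2.1 == k)) = some r ↔
        ∃ (j : Nat) (h : j < sm.length),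
          r = (s + (j : Int), sm[j]) ∧ sm[j].1 = k ∧
          (∀ (j' : Nat) (h' : j' < j), (sm[j']'(Nat.lt_trans h' h)).1 ≠ k) := by
  induction sm with
  | nil => intro s r; simp [PySem.List.enumerate]
  | cons p rest ih =>
    intro s r
    obtain ⟨mk, l⟩ := p
    rw [PySem.List.enumerate_cons]
    by_cases h : mk = k
    · subst h
      simp only [List.find?_cons, BEq.rfl]
      constructor
      · intro hr
        refine ⟨0, by simp, ?_, rfl, by omega⟩
        simpa using hr.symm
      · rintro ⟨j, hj, hr, hk, hfirst⟩
        match j with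
        | 0 => simp at hr ⊢; simp [hr]
        | j + 1 => exact absurd rfl (hfirst 0 (by omega))
    · have hne : ((mk, l).1 == k) = false := by simp [h]
      simp only [List.find?_cons, hne]
      rw [ih (s + 1)]
      constructor
      · rintro ⟨j, hj, hr, hk, hfirst⟩
        refine ⟨j + 1, by simpa using Nat.succ_lt_succ hj, ?_, by simpa using hk, ?_⟩
        · simp [hr]
          ring
        · intro j' hj'
          match j' with
          | 0 => simpa using h
          | j'' + 1 => exact hfirst j'' (by omega)
      · rintro ⟨j, hj, hr, hk, hfirst⟩
        match j with
        | 0 => simp at hk; exact absurd hk h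
        | j + 1 =>
          refine ⟨j, by simpa using Nat.lt_of_succ_lt_succ hj, ?_, by simpa using hk, ?_⟩
          · simp [hr]
            ring
          · intro j' hj'
            exact hfirst (j' + 1) (by omega)

lemma dict_contains_iff (d : List (String × String)) (k : String) :
    (PySem.Dict.mk d).contains k = true ↔ ∃ v, (k, v) ∈ d := by
  rw [PySem.Dict.contains_mk]
  simp only [List.any_eq_true, beq_iff_eq]
  constructor
  · rintro ⟨⟨a, b⟩, hm, rfl⟩; exact ⟨b, hm⟩
  · rintro ⟨v, hv⟩; exact ⟨(k, v), hv, rfl⟩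

lemma dict_get?_of_mem {d : List (String × String)} (hnd : (d.map Prod.fst).Nodup)
    {k v : String} (h : (k, v) ∈ d) : (PySem.Dict.mk d).get? k = some v := by
  induction d with
  | nil => simp at h
  | cons p rest ih =>
    obtain ⟨k0, v0⟩ := p
    rw [PySem.Dict.get?_mk_cons]
    simp only [List.map_cons, List.nodup_cons] at hnd
    rcases List.mem_cons.mp h with heq | hmem
    · obtain ⟨rfl, rfl⟩ := Prod.mk.injEq k0 v0 k v ▸ heq.symm
      simp
    · have hne : k0 ≠ k := by
        rintro rfl
        exact hnd.1 (List.mem_map.mpr ⟨(k0, v), hmem, rfl⟩)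
      simp only [beq_iff_eq, if_neg hne]
      exact ih hnd.2 hmem

lemma dict_getD_of_mem {d : List (String × String)} (hnd : (d.map Prod.fst).Nodup)
    {k v : String} (h : (k, v) ∈ d) : (PySem.Dict.mk d).getD k "" = v := by
  have := dict_get?_of_mem hnd h
  simp [PySem.Dict.getD, this]

lemma aTup_none {sm : List (String × String)} {kv : String × String}
    (h : kv.1 ∉ sm.map Prod.fst) : aTup sm kv = (kv.1, -1, kv.2) := by
  unfold aTup get_key_from_tuple_list
  rw [(find_enum_none sm kv.1 0).mpr h]

lemma aTup_found {sm : List (String × String)} {kv : String × String}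
    (h : kv.1 ∈ sm.map Prod.fst) :
    ∃ (j : Nat) (hj : j < sm.length), sm[j].1 = kv.1 ∧
      (∀ (j' : Nat) (h' : j' < j), (sm[j']'(Nat.lt_trans h' hj)).1 ≠ kv.1) ∧
      aTup sm kv = (sm[j].2, (j : Int), kv.2) := by
  cases heq : (PySem.List.enumerate sm 0).find? (fun iv => iv.2.1 == kv.1) with
  | none => exact absurd h ((find_enum_none sm kv.1 0).mp heq)
  | some r =>
    obtain ⟨j, hj, hr, hk, hfirst⟩ := (find_enum_some sm kv.1 0 r).mp heq
    refine ⟨j, hj, hk, hfirst, ?_⟩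
    unfold aTup get_key_from_tuple_list
    rw [heq, hr]
    simp

lemma aTup_idx_neg_iff (sm : List (String × String)) (kv : String × String) :
    (aTup sm kv).2.1 = -1 ↔ kv.1 ∉ sm.map Prod.fst := by
  by_cases h : kv.1 ∈ sm.map Prod.fst
  · obtain ⟨j, hj, _, _, he⟩ := aTup_found h
    rw [he]
    simp [h]
  · rw [aTup_none h]
    simp [h]

lemma firstocc_unique {sm : List (String × String)} {j j₀ : Nat}
    (hj : j < sm.length) (hj₀ : j₀ < sm.length) (he : sm[j].1 = sm[j₀].1)
    (h1 : ∀ (j' : Nat) (h' : j' < j), (sm[j']'(Nat.lt_trans h' hj)).1 ≠ sm[j].1)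
    (h2 : ∀ (j' : Nat) (h' : j' < j₀), (sm[j']'(Nat.lt_trans h' hj₀)).1 ≠ sm[j₀].1) :
    j = j₀ := by
  rcases Nat.lt_trichotomy j j₀ with h | h | h
  · exact absurd he (h2 j h)
  · exact h
  · exact absurd he.symm (h1 j₀ h)

lemma sorted_aOrd (d sm : List (String × String)) (hnd : (d.map Prod.fst).Nodup) :
    PySem.List.sorted (aOrd d sm) (fun x => x.2.1) = selP d sm 0 PySem.Set.empty := by
  apply PySem.List.sorted_eq_of_perm_of_pairwise_lt
  · have hnsel : (selP d sm 0 PySem.Set.empty).Nodup := by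
      refine (selP_pairwise d sm 0 PySem.Set.empty).imp ?_
      intro a b hlt he
      rw [he] at hlt
      omega
    have hnord : (aOrd d sm).Nodup := by
      unfold aOrd
      refine List.Nodup.map_on ?_ (((List.Nodup.of_map Prod.fst hnd)).filter _)
      intro kv1 hm1 kv2 hm2 he
      have hc1 := of_decide_eq_true (List.mem_filter.mp hm1).2
      have hc2 := of_decide_eq_true (List.mem_filter.mp hm2).2
      have hk1 : kv1.1 ∈ sm.map Prod.fst := by
        by_contra hn
        exact hc1 ((aTup_idx_neg_iff sm kv1).mpr hn)
      have hk2 : kv2.1 ∈ sm.map Prod.fst := by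
        by_contra hn
        exact hc2 ((aTup_idx_neg_iff sm kv2).mpr hn)
      obtain ⟨j1, hj1, hks1, _, he1⟩ := aTup_found hk1
      obtain ⟨j2, hj2, hks2, _, he2⟩ := aTup_found hk2
      rw [he1, he2] at he
      have hei : (j1 : Int) = (j2 : Int) := congrArg (fun p => p.2.1) he
      have hev : kv1.2 = kv2.2 := congrArg (fun p => p.2.2) he
      have hjj : j1 = j2 := by exact_mod_cast hei
      subst hjj
      have : kv1.1 = kv2.1 := hks1.symm.trans hks2
      exact Prod.ext this hev
    rw [List.perm_ext_iff_of_nodup hnsel hnord]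
    intro t
    rw [mem_selP d sm 0 PySem.Set.empty t]
    unfold aOrd
    rw [List.mem_map]
    constructor
    · rintro ⟨j, hj, hcont, -, hfirst, rfl⟩
      obtain ⟨v, hv⟩ := (dict_contains_iff d (sm[j].1)).mp hcont
      have hksm : (sm[j].1, v).1 ∈ sm.map Prod.fst :=
        List.mem_map.mpr ⟨sm[j], List.getElem_mem hj, rfl⟩
      obtain ⟨j₀, hj₀, hks₀, hfirst₀, he₀⟩ := aTup_found hksm
      have he' : sm[j₀].1 = sm[j].1 := hks₀
      have hfirst₀' : ∀ (j' : Nat) (h' : j' < j₀), (sm[j']'(Nat.lt_trans h' hj₀)).1 ≠ sm[j₀].1 := by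
        intro j' h'
        rw [he']
        exact hfirst₀ j' h'
      have hjj : j₀ = j := firstocc_unique hj₀ hj he' hfirst₀' hfirst
      subst hjj
      refine ⟨(sm[j₀].1, v), List.mem_filter.mpr ⟨hv, ?_⟩, ?_⟩
      · apply decide_eq_true
        rw [he₀]
        simp
      · rw [he₀, dict_getD_of_mem hnd hv]
        simp
    · rintro ⟨kv, hmf, rfl⟩
      have hkd := List.mem_of_mem_filter hmf
      have hc := of_decide_eq_true (List.mem_filter.mp hmf).2
      have hk : kv.1 ∈ sm.map Prod.fst := by
        by_contra hn
        exact hc ((aTup_idx_neg_iff sm kv).mpr hn)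
      obtain ⟨j, hj, hks, hfirst, he⟩ := aTup_found hk
      have hmem : (sm[j].1, kv.2) ∈ d := by
        rw [hks]
        exact (Prod.mk.eta (p := kv)) ▸ hkd
      refine ⟨j, hj, (dict_contains_iff d (sm[j].1)).mpr ⟨kv.2, hmem⟩,
        List.not_mem_nil, ?_, ?_⟩
      · intro j' hj'
        rw [hks]
        exact hfirst j' hj'
      · rw [he, dict_getD_of_mem hnd hmem]
        simp
  · exact selP_pairwise d sm 0 PySem.Set.empty

lemma aUn_map (d sm : List (String × String)) :
    (aUn d sm).map (fun item => item.1 ++ ": " ++ item.2.2) =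
      (d.filter (fun kv => !(PySem.Set.contains (PySem.Set.ofList (sm.map Prod.fst)) kv.1))).map
        (fun kv => kv.1 ++ ": " ++ kv.2) := by
  unfold aUn
  rw [List.map_map]
  have hcond : ∀ kv : String × String,
      (decide ((aTup sm kv).2.1 = -1)) =
        !(PySem.Set.contains (PySem.Set.ofList (sm.map Prod.fst)) kv.1) := by
    intro kv
    by_cases h : kv.1 ∈ sm.map Prod.fst
    · have h1 : PySem.Set.contains (PySem.Set.ofList (sm.map Prod.fst)) kv.1 = true :=
        (PySem.Set.contains_iff _ _).mpr ((PySem.Set.mem_ofList _ _).mpr h)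
      rw [h1]
      simp [aTup_idx_neg_iff, h]
    · have h1 : PySem.Set.contains (PySem.Set.ofList (sm.map Prod.fst)) kv.1 = false := by
        cases hb : PySem.Set.contains (PySem.Set.ofList (sm.map Prod.fst)) kv.1
        · rfl
        · exact absurd ((PySem.Set.mem_ofList _ _).mp ((PySem.Set.contains_iff _ _).mp hb)) h
      rw [h1]
      simp [aTup_idx_neg_iff, h]
  rw [List.filter_congr (fun kv _ => hcond kv)]
  apply List.map_congr_left
  intro kv hm
  have hb := (List.mem_filter.mp hm).2
  have h : kv.1 ∉ sm.map Prod.fst := by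
    intro hmem
    rw [(PySem.Set.contains_iff _ _).mpr ((PySem.Set.mem_ofList _ _).mpr hmem)] at hb
    simp at hb
  simp only [Function.comp_apply]
  rw [aTup_none h]

-- ===== VERDICT (by name: the statement is the Claim_ definition above) =====
theorem build_string_from_dict_spec : Claim_equal_build_string_from_dict := by
  intro d sm _hdom hpre
  unfold Spec_build_string_from_dict build_string_from_dict build_string_from_dict_alt
  simp only [foldl_bsfdStep sm d [] [], List.nil_append, PySem.List.slice?_none_none_neg_one,
    Option.getD_some, List.map_append, sorted_aOrd d sm hpre, ← bAltLoop_eq_selP d sm 0]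
  rw [List.map_reverse, aUn_map d sm]
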